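-- pv_equiv track=rewrite | github.com/rafaelmikayelyan/dcp | foobar/level_2/level_2_2.py | solution
-- ===== SOURCE A (Python) =====
-- def solution(s: str) -> int:
--     salutes = 0
--     left = 0
--     for i in s:
--         if i == '>':
--             left += 1
--         elif i == '<':
--             salutes += left
--     return salutes * 2
-- ===== SOURCE B (Python) =====
-- def solution(s: str) -> int:
--     total = 0
--     for i in range(len(s)):
--         if s[i] == '<':
--             total += s[:i].count('>')
--     return total * 2
-- ===== Notes on version B (the rewrite author's own statement) =====
-- stated objective: alternative
-- what changed: Replaces A's single pass with a running count of '>' by a nested-scan decomposition: for each '<' at index i, count the '>' characters in the prefix s[:i], then double the sum.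
import Mathlib
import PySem

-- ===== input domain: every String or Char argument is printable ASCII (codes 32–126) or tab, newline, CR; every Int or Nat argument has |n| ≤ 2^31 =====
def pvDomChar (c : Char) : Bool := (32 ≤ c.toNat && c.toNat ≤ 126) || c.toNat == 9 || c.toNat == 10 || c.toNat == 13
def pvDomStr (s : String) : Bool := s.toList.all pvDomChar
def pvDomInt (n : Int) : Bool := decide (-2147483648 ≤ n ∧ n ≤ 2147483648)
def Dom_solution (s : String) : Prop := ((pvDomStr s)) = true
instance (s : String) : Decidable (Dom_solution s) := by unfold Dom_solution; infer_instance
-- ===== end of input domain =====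

-- B replaces A's single pass (running count of '>') with a per-'<' prefix scan; objective: alternative decomposition.

-- ===== PORT A =====
-- single pass: state (salutes, left), left = running count of '>'
def solution (s : String) : Int :=
  (s.toList.foldl
    (fun (st : Int × Int) i =>
      if i = '>' then (st.1, st.2 + 1)
      else if i = '<' then (st.1 + st.2, st.2)
      else st)
    (0, 0)).1 * 2

-- ===== PORT B =====
-- for each index i with s[i] == '<', add the number of '>' in the prefix s[:i]; double at the end
def solution_alt (s : String) : Int :=
  ((List.range s.toList.length).foldl
    (fun (total : Int) i =>
      if s.toList[i]? = some '<' then total + ((s.toList.take i).count '>' : Int) else total)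
    0) * 2

-- ===== PRECONDITION & SPEC =====
def Spec_solution (s : String) (out : Int) : Prop := out = solution_alt s
instance (s : String) (out : Int) : Decidable (Spec_solution s out) := by unfold Spec_solution; infer_instance

-- ===== CLAIM (what is proved, stated in full; the proofs are below) =====
def Claim_equal_solution : Prop := ∀ (s : String), Dom_solution s → Spec_solution s (solution s)

-- ===== LEMMAS AND PROOFS =====

-- Invariant: over any char list l, A's fold state equals (B's total over l, count of '>' in l).
theorem pv_main (l : List Char) :
    l.foldl
      (fun (st : Int × Int) i =>
        if i = '>' then (st.1, st.2 + 1)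
        else if i = '<' then (st.1 + st.2, st.2)
        else st)
      (0, 0)
    = (((List.range l.length).foldl
          (fun (total : Int) i =>
            if l[i]? = some '<' then total + ((l.take i).count '>' : Int) else total)
          0),
       (l.count '>' : Int)) := by
  induction l using List.reverseRecOn with
  | nil => simp
  | append_singleton l c ih =>
    rw [List.foldl_append, ih]
    have hcong : (List.range l.length).foldl
        (fun (total : Int) i =>
          if (l ++ [c])[i]? = some '<' then total + (((l ++ [c]).take i).count '>' : Int) else total)
        0
      = (List.range l.length).foldl
        (fun (total : Int) i =>
          if l[i]? = some '<' then total + ((l.take i).count '>' : Int) else total)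
        0 := by
      apply PySem.List.foldl_congr_mem
      intro a x hx
      have hlt : x < l.length := List.mem_range.mp hx
      rw [List.getElem?_append_left hlt, List.take_append_of_le_length (le_of_lt hlt)]
    simp only [List.length_append, List.length_singleton, List.range_succ, List.foldl_append,
      List.foldl_cons, List.foldl_nil, hcong]
    simp only [List.getElem?_append_right (le_refl l.length), Nat.sub_self,
      List.getElem?_cons_zero, List.take_left, List.count_append]
    by_cases h1 : c = '>'
    · simp [h1]
    · by_cases h2 : c = '<'
      · simp [h2]
      · simp [h1, h2]

-- ===== VERDICT (by name: the statement is the Claim_ definition above) =====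
theorem solution_spec : Claim_equal_solution := by
  intro s _
  unfold Spec_solution solution solution_alt
  rw [pv_main]
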